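-- pv_equiv track=rewrite | github.com/Br-quinones/Exercises | exercise_065.py | the_most_repeated_vowel
-- ===== SOURCE A (Python) =====
-- def the_most_repeated_vowel(text):
--     vowel_and_amount = {
--         "a" : 0,
--         "e" : 0,
--         "i" : 0,
--         "o" : 0,
--         "u" : 0,
--     }
--
--     for letter in text:
--         if letter in list(vowel_and_amount):
--             vowel_and_amount[letter] += 1
--
--     most_repeated_vowel_letter = ""
--     most_repeated_vowel_number = 0
--
--     for vowel in vowel_and_amount:
--         if vowel_and_amount[vowel] > most_repeated_vowel_number:
--             most_repeated_vowel_letter = vowel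
--             most_repeated_vowel_number = vowel_and_amount[vowel]
--
--         elif vowel_and_amount[vowel] == most_repeated_vowel_number and most_repeated_vowel_number != 0:
--             most_repeated_vowel_letter = most_repeated_vowel_letter + vowel
--
--     return most_repeated_vowel_letter
-- ===== SOURCE B (Python) =====
-- def _runs(vs):
--     if not vs:
--         return []
--     c = vs[0]
--     rest = vs[1:]
--     k = 0
--     while k < len(rest) and rest[k] == c:
--         k += 1
--     return [(c, 1 + k)] + _runs(rest[k:])
--
--
-- def the_most_repeated_vowel(text):
--     runs = _runs(sorted(c for c in text if c in "aeiou"))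
--     if not runs:
--         return ""
--     m = max(n for _, n in runs)
--     return "".join(v for v, n in runs if n == m)
-- ===== Notes on version B (the rewrite author's own statement) =====
-- stated objective: alternative
-- what changed: Instead of counting into a dict and scanning it with a running max with reset-and-concatenate state, B filters the vowels out of the text, sorts them (alphabetical order is exactly a,e,i,o,u), run-length-encodes the sorted list, and joins the letters of the maximal runs.
import Mathlib
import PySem

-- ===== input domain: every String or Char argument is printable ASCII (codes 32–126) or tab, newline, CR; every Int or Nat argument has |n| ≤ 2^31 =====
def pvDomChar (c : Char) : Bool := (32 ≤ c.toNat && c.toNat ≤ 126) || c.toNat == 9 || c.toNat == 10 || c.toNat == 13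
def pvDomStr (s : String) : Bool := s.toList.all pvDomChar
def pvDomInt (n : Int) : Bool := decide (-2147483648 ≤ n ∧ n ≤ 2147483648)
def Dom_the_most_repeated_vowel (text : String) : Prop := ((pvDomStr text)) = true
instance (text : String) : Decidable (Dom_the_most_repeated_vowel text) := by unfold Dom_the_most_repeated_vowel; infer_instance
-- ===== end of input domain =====

-- B replaces A's dict-counting with a running-max/reset scan by a sort-based algorithm:
-- filter the vowels out of the text, sort them (alphabetical order is a,e,i,o,u),
-- run-length-encode the sorted list, and join the letters of the maximal runs (objective: alternative).

-- ===== PORT A =====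
-- Python string concatenation is ported as accumulation of a List Char, turned into a String
-- (String.ofList) only at the very end; this is exact on code points.
def the_most_repeated_vowel (text : String) : String :=
  -- vowel_and_amount = {"a": 0, "e": 0, "i": 0, "o": 0, "u": 0}
  let d0 : PySem.Dict Char Int :=
    PySem.Dict.mk [('a', 0), ('e', 0), ('i', 0), ('o', 0), ('u', 0)]
  -- for letter in text: if letter in list(vowel_and_amount): vowel_and_amount[letter] += 1
  let d := text.toList.foldl
    (fun d c => if d.keys.contains c then d.modify c 0 (· + 1) else d) d0
  -- second loop: running max with reset/append over the dict in insertion order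
  let r := d.items.foldl
    (fun (acc : List Char × Int) v =>
      if acc.2 < v.2 then ([v.1], v.2)
      else if v.2 = acc.2 ∧ acc.2 ≠ 0 then (acc.1 ++ [v.1], acc.2) else acc)
    ([], 0)
  String.ofList r.1

-- ===== PORT B =====
-- _runs(vs): the inner while loop counts the leading elements of rest equal to c, which is
-- exactly (rest.takeWhile (· == c)).length; rest[k:] is rest.drop k.
def pvRuns : List Char → List (Char × Int)
  | [] => []
  | c :: rest =>
    let k := (rest.takeWhile (fun x => x == c)).length
    (c, 1 + (k : Int)) :: pvRuns (rest.drop k)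
termination_by vs => vs.length
decreasing_by simp

def the_most_repeated_vowel_alt (text : String) : String :=
  -- runs = _runs(sorted(c for c in text if c in "aeiou"))
  let runs := pvRuns (PySem.List.sorted
    (text.toList.filter (fun c => ['a', 'e', 'i', 'o', 'u'].contains c)) (fun x => x) false)
  if runs.isEmpty then ""  -- if not runs: return ""
  else
    -- m = max(n for _, n in runs)  (runs nonempty here; .getD 0 renders the guarded max totally)
    let m := (PySem.List.max? (runs.map Prod.snd) (fun x => x)).getD 0
    String.ofList ((runs.filter (fun p => p.2 == m)).map Prod.fst)

-- ===== PRECONDITION & SPEC =====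
def Spec_the_most_repeated_vowel (text : String) (out : String) : Prop := out = the_most_repeated_vowel_alt text
instance (text : String) (out : String) : Decidable (Spec_the_most_repeated_vowel text out) := by unfold Spec_the_most_repeated_vowel; infer_instance

-- ===== CLAIM (what is proved, stated in full; the proofs are below) =====
def Claim_equal_the_most_repeated_vowel : Prop := ∀ (text : String), Dom_the_most_repeated_vowel text → Spec_the_most_repeated_vowel text (the_most_repeated_vowel text)

-- ===== LEMMAS AND PROOFS =====

-- A's counting loop over the literal 5-key dict adds each vowel's number of occurrences.
theorem pv_countA (cs : List Char) (ca ce ci co cu : Int) :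
    cs.foldl (fun d c => if (PySem.Dict.keys d).contains c then PySem.Dict.modify d c 0 (· + 1) else d)
      (PySem.Dict.mk [('a', ca), ('e', ce), ('i', ci), ('o', co), ('u', cu)])
    = PySem.Dict.mk [('a', ca + cs.count 'a'), ('e', ce + cs.count 'e'),
        ('i', ci + cs.count 'i'), ('o', co + cs.count 'o'), ('u', cu + cs.count 'u')] := by
  induction cs generalizing ca ce ci co cu with
  | nil => simp
  | cons c t ih =>
    simp only [List.foldl_cons, List.count_cons]
    by_cases ha : c = 'a'
    · subst ha
      rw [show (if (PySem.Dict.keys (PySem.Dict.mk [('a', ca), ('e', ce), ('i', ci), ('o', co), ('u', cu)])).contains 'a'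
            then PySem.Dict.modify (PySem.Dict.mk [('a', ca), ('e', ce), ('i', ci), ('o', co), ('u', cu)]) 'a' 0 (· + 1)
            else (PySem.Dict.mk [('a', ca), ('e', ce), ('i', ci), ('o', co), ('u', cu)]))
          = PySem.Dict.mk [('a', ca + 1), ('e', ce), ('i', ci), ('o', co), ('u', cu)] from by
            simp [PySem.Dict.keys, PySem.Dict.modify, PySem.Dict.insert, PySem.Dict.getD, PySem.Dict.get?], ih]
      simp
      ring_nf
    by_cases he : c = 'e'
    · subst he
      rw [show (if (PySem.Dict.keys (PySem.Dict.mk [('a', ca), ('e', ce), ('i', ci), ('o', co), ('u', cu)])).contains 'e'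
            then PySem.Dict.modify (PySem.Dict.mk [('a', ca), ('e', ce), ('i', ci), ('o', co), ('u', cu)]) 'e' 0 (· + 1)
            else (PySem.Dict.mk [('a', ca), ('e', ce), ('i', ci), ('o', co), ('u', cu)]))
          = PySem.Dict.mk [('a', ca), ('e', ce + 1), ('i', ci), ('o', co), ('u', cu)] from by
            simp [PySem.Dict.keys, PySem.Dict.modify, PySem.Dict.insert, PySem.Dict.getD, PySem.Dict.get?], ih]
      simp
      ring_nf
    by_cases hi : c = 'i'
    · subst hi
      rw [show (if (PySem.Dict.keys (PySem.Dict.mk [('a', ca), ('e', ce), ('i', ci), ('o', co), ('u', cu)])).contains 'i'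
            then PySem.Dict.modify (PySem.Dict.mk [('a', ca), ('e', ce), ('i', ci), ('o', co), ('u', cu)]) 'i' 0 (· + 1)
            else (PySem.Dict.mk [('a', ca), ('e', ce), ('i', ci), ('o', co), ('u', cu)]))
          = PySem.Dict.mk [('a', ca), ('e', ce), ('i', ci + 1), ('o', co), ('u', cu)] from by
            simp [PySem.Dict.keys, PySem.Dict.modify, PySem.Dict.insert, PySem.Dict.getD, PySem.Dict.get?], ih]
      simp
      ring_nf
    by_cases ho : c = 'o'
    · subst ho
      rw [show (if (PySem.Dict.keys (PySem.Dict.mk [('a', ca), ('e', ce), ('i', ci), ('o', co), ('u', cu)])).contains 'o'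
            then PySem.Dict.modify (PySem.Dict.mk [('a', ca), ('e', ce), ('i', ci), ('o', co), ('u', cu)]) 'o' 0 (· + 1)
            else (PySem.Dict.mk [('a', ca), ('e', ce), ('i', ci), ('o', co), ('u', cu)]))
          = PySem.Dict.mk [('a', ca), ('e', ce), ('i', ci), ('o', co + 1), ('u', cu)] from by
            simp [PySem.Dict.keys, PySem.Dict.modify, PySem.Dict.insert, PySem.Dict.getD, PySem.Dict.get?], ih]
      simp
      ring_nf
    by_cases hu : c = 'u'
    · subst hu
      rw [show (if (PySem.Dict.keys (PySem.Dict.mk [('a', ca), ('e', ce), ('i', ci), ('o', co), ('u', cu)])).contains 'u'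
            then PySem.Dict.modify (PySem.Dict.mk [('a', ca), ('e', ce), ('i', ci), ('o', co), ('u', cu)]) 'u' 0 (· + 1)
            else (PySem.Dict.mk [('a', ca), ('e', ce), ('i', ci), ('o', co), ('u', cu)]))
          = PySem.Dict.mk [('a', ca), ('e', ce), ('i', ci), ('o', co), ('u', cu + 1)] from by
            simp [PySem.Dict.keys, PySem.Dict.modify, PySem.Dict.insert, PySem.Dict.getD, PySem.Dict.get?], ih]
      simp
      ring_nf
    rw [show (if (PySem.Dict.keys (PySem.Dict.mk [('a', ca), ('e', ce), ('i', ci), ('o', co), ('u', cu)])).contains c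
            then PySem.Dict.modify (PySem.Dict.mk [('a', ca), ('e', ce), ('i', ci), ('o', co), ('u', cu)]) c 0 (· + 1)
            else (PySem.Dict.mk [('a', ca), ('e', ce), ('i', ci), ('o', co), ('u', cu)]))
          = PySem.Dict.mk [('a', ca), ('e', ce), ('i', ci), ('o', co), ('u', cu)] from by
            simp [PySem.Dict.keys, ha, he, hi, ho, hu], ih]
    simp [ha, he, hi, ho, hu]

def pvStepA : List Char × Int → Char × Int → List Char × Int :=
  fun acc v =>
    if acc.2 < v.2 then ([v.1], v.2)
    else if v.2 = acc.2 ∧ acc.2 ≠ 0 then (acc.1 ++ [v.1], acc.2) else acc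

def pvMaxAux (l : List (Char × Int)) (m : Int) : Int := l.foldl (fun a x => max a x.2) m

theorem pv_maxAux_le (l : List (Char × Int)) (m : Int) : m ≤ pvMaxAux l m := by
  induction l generalizing m with
  | nil => simp [pvMaxAux]
  | cons x t ih =>
    simp only [pvMaxAux, List.foldl_cons] at *
    exact le_trans (le_max_left m x.2) (ih (max m x.2))

theorem pv_le_maxAux (l : List (Char × Int)) (m : Int) : ∀ x ∈ l, x.2 ≤ pvMaxAux l m := by
  induction l generalizing m with
  | nil => simp
  | cons y t ih =>
    intro x hx
    rcases List.mem_cons.mp hx with h | h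
    · subst h
      exact le_trans (le_max_right m x.2) (pv_maxAux_le t (max m x.2))
    · exact ih (max m y.2) x h

theorem pv_inv (l : List (Char × Int)) : ∀ (p : List (Char × Int)) (m : Int), 0 < m →
    (∀ y ∈ p, y.2 ≤ m) →
    List.foldl pvStepA ((p.filter (fun y => y.2 == m)).map Prod.fst, m) l
    = (((p ++ l).filter (fun y => y.2 == pvMaxAux l m)).map Prod.fst, pvMaxAux l m) := by
  induction l with
  | nil => intro p m hm hp; simp [pvMaxAux]
  | cons x t ih =>
    intro p m hm hp
    simp only [List.foldl_cons]
    rcases lt_trichotomy m x.2 with h | h | h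
    · have hstep : pvStepA ((p.filter (fun y => y.2 == m)).map Prod.fst, m) x = ([x.1], x.2) := by
        simp [pvStepA, h]
      have hfil : ([x.1] : List Char) = ((p ++ [x]).filter (fun y => y.2 == x.2)).map Prod.fst := by
        have hnil : p.filter (fun y => y.2 == x.2) = [] := by
          apply List.filter_eq_nil_iff.mpr
          intro y hy
          have := hp y hy
          simp only [beq_iff_eq]
          intro hEq
          omega
        simp [List.filter_append, hnil]
      have hmax : pvMaxAux (x :: t) m = pvMaxAux t x.2 := by
        simp [pvMaxAux, max_eq_right (le_of_lt h)]
      rw [hstep, hmax, hfil, show p ++ x :: t = (p ++ [x]) ++ t by simp]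
      exact ih (p ++ [x]) x.2 (lt_trans hm h) (by
        intro y hy
        rcases List.mem_append.mp hy with h1 | h1
        · exact le_of_lt (lt_of_le_of_lt (hp y h1) h)
        · simp only [List.mem_singleton] at h1; simp [h1])
    · have hstep : pvStepA ((p.filter (fun y => y.2 == m)).map Prod.fst, m) x
          = ((p.filter (fun y => y.2 == m)).map Prod.fst ++ [x.1], m) := by
        simp [pvStepA, h.symm]
        omega
      have hfil : (p.filter (fun y => y.2 == m)).map Prod.fst ++ [x.1]
          = ((p ++ [x]).filter (fun y => y.2 == m)).map Prod.fst := by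
        simp [List.filter_append, h.symm]
      have hmax : pvMaxAux (x :: t) m = pvMaxAux t m := by
        simp [pvMaxAux, ← h]
      rw [hstep, hmax, hfil, show p ++ x :: t = (p ++ [x]) ++ t by simp]
      exact ih (p ++ [x]) m hm (by
        intro y hy
        rcases List.mem_append.mp hy with h1 | h1
        · exact hp y h1
        · simp only [List.mem_singleton] at h1; simp [h1, ← h])
    · have hstep : pvStepA ((p.filter (fun y => y.2 == m)).map Prod.fst, m) x
          = ((p.filter (fun y => y.2 == m)).map Prod.fst, m) := by
        simp only [pvStepA]
        rw [if_neg (by omega), if_neg (by rintro ⟨h1, h2⟩; omega)]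
      have hfil : (p.filter (fun y => y.2 == m)).map Prod.fst
          = ((p ++ [x]).filter (fun y => y.2 == m)).map Prod.fst := by
        have : x.2 ≠ m := by omega
        simp [List.filter_append, this]
      have hmax : pvMaxAux (x :: t) m = pvMaxAux t m := by
        simp [pvMaxAux, max_eq_left (le_of_lt h)]
      rw [hstep, hmax, hfil, show p ++ x :: t = (p ++ [x]) ++ t by simp]
      exact ih (p ++ [x]) m hm (by
        intro y hy
        rcases List.mem_append.mp hy with h1 | h1
        · exact hp y h1
        · simp only [List.mem_singleton] at h1; simp [h1, le_of_lt h])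

theorem pv_inv0 (l : List (Char × Int)) (hl : ∀ x ∈ l, 0 ≤ x.2) :
    List.foldl pvStepA ([], 0) l
    = (if pvMaxAux l 0 = 0 then (([] : List Char), (0 : Int))
       else ((l.filter (fun y => y.2 == pvMaxAux l 0)).map Prod.fst, pvMaxAux l 0)) := by
  induction l with
  | nil => simp [pvMaxAux]
  | cons x t ih =>
    have hx : 0 ≤ x.2 := hl x (List.mem_cons_self ..)
    simp only [List.foldl_cons]
    by_cases h0 : 0 < x.2
    · have hstep : pvStepA (([] : List Char), (0 : Int)) x = ([x.1], x.2) := by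
        simp [pvStepA, h0]
      have hfil : ([x.1] : List Char) = (([x] : List (Char × Int)).filter (fun y => y.2 == x.2)).map Prod.fst := by
        simp
      have hmax : pvMaxAux (x :: t) 0 = pvMaxAux t x.2 := by
        simp [pvMaxAux, max_eq_right (le_of_lt h0)]
      have hne : pvMaxAux t x.2 ≠ 0 := by
        have := pv_maxAux_le t x.2
        omega
      rw [hstep, hfil, pv_inv t [x] x.2 h0 (by intro y hy; simp only [List.mem_singleton] at hy; simp [hy])]
      rw [hmax, if_neg hne]
      simp
    · have hx0 : x.2 = 0 := by omega
      have hstep : pvStepA (([] : List Char), (0 : Int)) x = (([] : List Char), (0 : Int)) := by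
        simp [pvStepA, hx0]
      have hmax : pvMaxAux (x :: t) 0 = pvMaxAux t 0 := by
        simp [pvMaxAux, hx0]
      rw [hstep, ih (fun y hy => hl y (List.mem_cons_of_mem _ hy)), hmax]
      by_cases hM : pvMaxAux t 0 = 0
      · simp [hM]
      · have : x.2 ≠ pvMaxAux t 0 := by omega
        simp [hM, this]

-- ---- B side: the sorted vowel list is the canonical block form ----

def pvRep5 (na ne ni no nu : Nat) : List Char :=
  List.replicate na 'a' ++ (List.replicate ne 'e' ++ (List.replicate ni 'i'
    ++ (List.replicate no 'o' ++ List.replicate nu 'u')))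

theorem pv_pw (c : Char) (m : Nat) (rest : List Char)
    (h1 : ∀ x ∈ rest, c ≤ x) (h2 : rest.Pairwise (· ≤ ·)) :
    (List.replicate m c ++ rest).Pairwise (· ≤ ·) := by
  apply List.pairwise_append.mpr
  refine ⟨List.pairwise_replicate.mpr (Or.inr le_rfl), h2, ?_⟩
  intro a ha b hb
  rw [List.eq_of_mem_replicate ha]
  exact h1 b hb

theorem pv_sorted_eq (cs : List Char) :
    PySem.List.sorted (cs.filter (fun c => ['a', 'e', 'i', 'o', 'u'].contains c)) (fun x => x) false
    = pvRep5 (cs.count 'a') (cs.count 'e') (cs.count 'i') (cs.count 'o') (cs.count 'u') := by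
  apply PySem.List.sorted_id_eq_of_perm_of_pairwise
  · apply List.perm_iff_count.mpr
    intro x
    by_cases hx : x ∈ (['a', 'e', 'i', 'o', 'u'] : List Char)
    · rw [List.count_filter (by simpa using hx)]
      fin_cases hx <;> simp [pvRep5, List.count_append, List.count_replicate]
    · rw [List.count_eq_zero.mpr (fun hmem => hx (by
        simp only [pvRep5, List.mem_append, List.mem_replicate] at hmem
        rcases hmem with ⟨_, h⟩ | (⟨_, h⟩ | (⟨_, h⟩ | (⟨_, h⟩ | ⟨_, h⟩))) <;> simp [h]))]
      rw [Eq.comm, List.count_eq_zero]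
      intro hmem
      exact hx (by simpa using (List.mem_filter.mp hmem).2)
  · unfold pvRep5
    apply pv_pw _ _ _ ?_ (pv_pw _ _ _ ?_ (pv_pw _ _ _ ?_ (pv_pw _ _ _ ?_ (List.pairwise_replicate.mpr (Or.inr le_rfl))))) <;>
      · intro x hx
        simp only [List.mem_append, List.mem_replicate] at hx
        first
        | (rcases hx with ⟨_, h⟩ | (⟨_, h⟩ | (⟨_, h⟩ | ⟨_, h⟩)) <;> subst h <;> decide)
        | (rcases hx with ⟨_, h⟩ | (⟨_, h⟩ | ⟨_, h⟩) <;> subst h <;> decide)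
        | (rcases hx with ⟨_, h⟩ | ⟨_, h⟩ <;> subst h <;> decide)
        | (rcases hx with ⟨_, h⟩ <;> subst h <;> decide)

theorem pv_takeWhile_rep (k : Nat) (c : Char) (rest : List Char) (h : ∀ x ∈ rest, x ≠ c) :
    (List.replicate k c ++ rest).takeWhile (fun x => x == c) = List.replicate k c := by
  induction k with
  | zero =>
    cases rest with
    | nil => simp
    | cons y t =>
      simp [List.takeWhile_cons, h y (List.mem_cons_self ..)]
  | succ k ih => simp [List.replicate_succ, List.takeWhile_cons, ih]

theorem pv_runs_rep (n : Nat) (c : Char) (rest : List Char) (h : ∀ x ∈ rest, x ≠ c) :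
    pvRuns (List.replicate n c ++ rest)
    = if n = 0 then pvRuns rest else (c, (n : Int)) :: pvRuns rest := by
  cases n with
  | zero => simp
  | succ k =>
    rw [List.replicate_succ, List.cons_append]
    rw [show pvRuns (c :: (List.replicate k c ++ rest)) = ((c, 1 + (((List.replicate k c ++ rest).takeWhile (fun x => x == c)).length : Int)) :: pvRuns ((List.replicate k c ++ rest).drop ((List.replicate k c ++ rest).takeWhile (fun x => x == c)).length)) from by rw [pvRuns]]
    rw [pv_takeWhile_rep k c rest h]
    simp only [List.length_replicate, List.drop_left' (by simp : (List.replicate k c).length = k)]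
    rw [if_neg (Nat.succ_ne_zero k)]
    congr 1
    push_cast
    ring_nf

theorem pv_runs_rep5 (na ne ni no nu : Nat) :
    pvRuns (pvRep5 na ne ni no nu)
    = ([('a', (na : Int)), ('e', (ne : Int)), ('i', (ni : Int)), ('o', (no : Int)),
        ('u', (nu : Int))].filter (fun p => !(p.2 == 0))) := by
  have ha : ∀ x ∈ (List.replicate ne 'e' ++ (List.replicate ni 'i' ++ (List.replicate no 'o' ++ List.replicate nu 'u'))), x ≠ 'a' := by
    intro x hx
    simp only [List.mem_append, List.mem_replicate] at hx
    rcases hx with ⟨_, h⟩ | (⟨_, h⟩ | (⟨_, h⟩ | ⟨_, h⟩)) <;> subst h <;> decide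
  have he : ∀ x ∈ (List.replicate ni 'i' ++ (List.replicate no 'o' ++ List.replicate nu 'u')), x ≠ 'e' := by
    intro x hx
    simp only [List.mem_append, List.mem_replicate] at hx
    rcases hx with ⟨_, h⟩ | (⟨_, h⟩ | ⟨_, h⟩) <;> subst h <;> decide
  have hi : ∀ x ∈ (List.replicate no 'o' ++ List.replicate nu 'u'), x ≠ 'i' := by
    intro x hx
    simp only [List.mem_append, List.mem_replicate] at hx
    rcases hx with ⟨_, h⟩ | ⟨_, h⟩ <;> subst h <;> decide
  have ho : ∀ x ∈ List.replicate nu 'u', x ≠ 'o' := by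
    intro x hx
    rcases List.mem_replicate.mp hx with ⟨_, h⟩
    subst h; decide
  unfold pvRep5
  rw [pv_runs_rep na 'a' _ ha, pv_runs_rep ne 'e' _ he, pv_runs_rep ni 'i' _ hi,
      pv_runs_rep no 'o' _ ho]
  rw [show pvRuns (List.replicate nu 'u') = pvRuns (List.replicate nu 'u' ++ []) from by simp,
      pv_runs_rep nu 'u' [] (by simp)]
  have h0 : pvRuns [] = [] := by rw [pvRuns]
  simp only [h0, List.filter_cons, List.filter_nil]
  simp [Int.natCast_eq_zero]

theorem pv_maxAux_filter (l : List (Char × Int)) (m : Int) (hm : 0 ≤ m) :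
    pvMaxAux (l.filter (fun p => !(p.2 == 0))) m = pvMaxAux l m := by
  induction l generalizing m with
  | nil => rfl
  | cons x t ih =>
    by_cases h : x.2 = 0
    · have hf : List.filter (fun p => !(p.2 == 0)) (x :: t) = List.filter (fun p => !(p.2 == 0)) t := by
        simp [List.filter_cons, h]
      rw [hf, show pvMaxAux (x :: t) m = pvMaxAux t m from by simp [pvMaxAux, h, max_eq_left hm]]
      exact ih m hm
    · have hf : List.filter (fun p => !(p.2 == 0)) (x :: t) = x :: List.filter (fun p => !(p.2 == 0)) t := by
        simp [List.filter_cons, h]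
      rw [hf, show pvMaxAux (x :: t) m = pvMaxAux t (max m x.2) from rfl,
        show pvMaxAux (x :: List.filter (fun p => !(p.2 == 0)) t) m = pvMaxAux (List.filter (fun p => !(p.2 == 0)) t) (max m x.2) from rfl]
      exact ih (max m x.2) (le_trans hm (le_max_left _ _))

theorem pv_combine (l : List (Char × Int)) (h : ∀ x ∈ l, 0 ≤ x.2) :
    (if (l.filter (fun p => !(p.2 == 0))).isEmpty then ([] : List Char)
     else (((l.filter (fun p => !(p.2 == 0))).filter
        (fun p => p.2 == (PySem.List.max? ((l.filter (fun p => !(p.2 == 0))).map Prod.snd)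
          (fun x => x)).getD 0)).map Prod.fst))
    = (if pvMaxAux l 0 = 0 then [] else (l.filter (fun y => y.2 == pvMaxAux l 0)).map Prod.fst) := by
  by_cases hM : pvMaxAux l 0 = 0
  · have hF : l.filter (fun p => !(p.2 == 0)) = [] := by
      apply List.filter_eq_nil_iff.mpr
      intro x hx
      have h1 := pv_le_maxAux l 0 x hx
      have h2 := h x hx
      have hx0 : x.2 = 0 := by omega
      simp [hx0]
    simp [hF, hM]
  · have hFne : l.filter (fun p => !(p.2 == 0)) ≠ [] := by
      intro hF
      apply hM
      have := pv_maxAux_filter l 0 le_rfl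
      rw [hF] at this
      simpa [pvMaxAux] using this.symm
    obtain ⟨r, rs, hF⟩ := List.exists_cons_of_ne_nil hFne
    have hrl : r ∈ l := List.mem_of_mem_filter (hF ▸ List.mem_cons_self ..)
    have hr0 : r.2 ≠ 0 := by
      have := List.of_mem_filter (hF ▸ List.mem_cons_self (l := rs) (a := r))
      simpa using this
    have hrpos : 0 < r.2 := lt_of_le_of_ne (h r hrl) (Ne.symm hr0)
    have hmax : (PySem.List.max? ((l.filter (fun p => !(p.2 == 0))).map Prod.snd)
          (fun x => x)).getD 0 = pvMaxAux l 0 := by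
      rw [hF, List.map_cons, PySem.List.max?_id_cons, Option.getD_some, List.foldl_map]
      rw [show rs.foldl (fun a x => max a x.2) r.2 = pvMaxAux rs r.2 from rfl]
      rw [← pv_maxAux_filter l 0 le_rfl, hF,
        show pvMaxAux (r :: rs) 0 = pvMaxAux rs (max 0 r.2) from rfl, max_eq_right (le_of_lt hrpos)]
    have hfil : (l.filter (fun p => !(p.2 == 0))).filter (fun p => p.2 == pvMaxAux l 0)
        = l.filter (fun y => y.2 == pvMaxAux l 0) := by
      rw [List.filter_filter]
      apply List.filter_congr
      intro x hx
      by_cases hxM : x.2 = pvMaxAux l 0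
      · simp [hxM, hM]
      · simp [hxM]
    rw [if_neg (by simp [hF]), if_neg hM, hmax, hfil]

-- ===== VERDICT (by name: the statement is the Claim_ definition above) =====
theorem the_most_repeated_vowel_spec : Claim_equal_the_most_repeated_vowel := by
  intro text _
  unfold Spec_the_most_repeated_vowel the_most_repeated_vowel the_most_repeated_vowel_alt
  simp only []
  rw [pv_countA text.toList 0 0 0 0 0]
  rw [pv_sorted_eq text.toList, pv_runs_rep5]
  simp only [zero_add]
  rw [show (fun (acc : List Char × Int) (v : Char × Int) =>
      if acc.2 < v.2 then ([v.1], v.2)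
      else if v.2 = acc.2 ∧ acc.2 ≠ 0 then (acc.1 ++ [v.1], acc.2) else acc) = pvStepA from rfl]
  have hnn : ∀ x ∈ [('a', ((text.toList.count 'a' : Nat) : Int)), ('e', ((text.toList.count 'e' : Nat) : Int)),
      ('i', ((text.toList.count 'i' : Nat) : Int)), ('o', ((text.toList.count 'o' : Nat) : Int)),
      ('u', ((text.toList.count 'u' : Nat) : Int))], 0 ≤ x.2 := by
    intro x hx
    simp only [List.mem_cons, List.not_mem_nil, or_false] at hx
    rcases hx with h | h | h | h | h <;> simp [h]
  rw [pv_inv0 _ hnn]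
  simp only [apply_ite Prod.fst]
  rw [← pv_combine _ hnn]
  by_cases hE : (([('a', ((text.toList.count 'a' : Nat) : Int)), ('e', ((text.toList.count 'e' : Nat) : Int)),
      ('i', ((text.toList.count 'i' : Nat) : Int)), ('o', ((text.toList.count 'o' : Nat) : Int)),
      ('u', ((text.toList.count 'u' : Nat) : Int))].filter (fun p => !(p.2 == 0)))).isEmpty
  · simp [hE]
  · simp [hE]
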